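-- pv_equiv track=rewrite | github.com/eseiler18/NuclearFusion | models/WaveNet.py | buildDilation
-- ===== SOURCE A (Python) =====
-- def buildDilation(stack_size, layer_size):
--     dilationCoeff = [2**i for i in range(10)]
--     allDilations = []
--     for i in range(stack_size):
--         dilations = []
--         for j in range(layer_size):
--             dilations.append(dilationCoeff[j % 10])
--         allDilations.append(dilations)
--     return allDilations
-- ===== SOURCE B (Python) =====
-- def buildDilation(stack_size, layer_size):
--     out = []
--     k = stack_size
--     if k > 0:
--         base = [1, 2, 4, 8, 16, 32, 64, 128, 256, 512]
--         reps, extra = divmod(max(layer_size, 0), 10)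
--         row = base * reps + base[:extra]
--         while k > 0:
--             out.append(list(row))
--             k -= 1
--     return out
-- ===== Notes on version B (the rewrite author's own statement) =====
-- stated objective: alternative
-- what changed: B builds the periodic row by tiling the 10-element power block (list repetition plus a truncated prefix via divmod) instead of computing an element per index with j%10 lookups, and emits the stack with a countdown while-loop copying the row; no per-element modular indexing remains.
import Mathlib
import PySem

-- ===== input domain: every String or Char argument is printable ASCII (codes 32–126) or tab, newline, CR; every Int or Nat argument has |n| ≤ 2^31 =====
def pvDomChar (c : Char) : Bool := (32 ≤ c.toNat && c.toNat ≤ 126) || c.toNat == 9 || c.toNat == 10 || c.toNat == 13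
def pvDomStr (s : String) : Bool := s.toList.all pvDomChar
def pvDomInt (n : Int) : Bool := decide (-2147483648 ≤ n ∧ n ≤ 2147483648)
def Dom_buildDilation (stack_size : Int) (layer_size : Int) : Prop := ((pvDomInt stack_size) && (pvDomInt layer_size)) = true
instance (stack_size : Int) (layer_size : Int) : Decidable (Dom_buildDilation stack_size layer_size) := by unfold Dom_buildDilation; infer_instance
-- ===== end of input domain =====

-- B tiles the 10-element power block (repeat + truncated prefix via divmod) and emits the
-- stack with a countdown loop copying the row; alternative construction, same values.

-- ===== PORT A =====
def buildDilation (stack_size : Int) (layer_size : Int) : List (List Int) :=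
  let dilationCoeff : List Int := (PySem.List.pyRange 0 10 1).map (fun i => 2 ^ i.toNat)
  (PySem.List.pyRange 0 stack_size 1).foldl
    (fun allDilations _i =>
      allDilations ++
        [(PySem.List.pyRange 0 layer_size 1).foldl
          (fun dilations j => dilations ++ [PySem.List.pyGetD dilationCoeff (PySem.Int.mod j 10) 0]) []])
    []

-- ===== PORT B =====
-- 'while k > 0: out.append(list(row)); k -= 1' — structural countdown on k.toNat
def bdWhile (row : List Int) : Nat → List (List Int)
  | 0 => []
  | k + 1 => row :: bdWhile row k

def buildDilation_alt (stack_size : Int) (layer_size : Int) : List (List Int) :=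
  if 0 < stack_size then
    let base : List Int := [1, 2, 4, 8, 16, 32, 64, 128, 256, 512]
    let m : Int := max layer_size 0
    let reps : Int := PySem.Int.floordiv m 10
    let extra : Int := PySem.Int.mod m 10
    let row : List Int := (List.replicate reps.toNat base).flatten ++ base.take extra.toNat
    bdWhile row stack_size.toNat
  else []

-- ===== PRECONDITION & SPEC =====
def Spec_buildDilation (stack_size : Int) (layer_size : Int) (out : List (List Int)) : Prop := out = buildDilation_alt stack_size layer_size
instance (stack_size : Int) (layer_size : Int) (out : List (List Int)) : Decidable (Spec_buildDilation stack_size layer_size out) := by unfold Spec_buildDilation; infer_instance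

-- ===== CLAIM (what is proved, stated in full; the proofs are below) =====
def Claim_equal_buildDilation : Prop := ∀ (stack_size : Int) (layer_size : Int), Dom_buildDilation stack_size layer_size → Spec_buildDilation stack_size layer_size (buildDilation stack_size layer_size)

-- ===== LEMMAS AND PROOFS =====

lemma getD_coeff (j : Int) :
    PySem.List.pyGetD ((PySem.List.pyRange 0 10 1).map (fun i => (2:Int) ^ i.toNat)) (PySem.Int.mod j 10) 0
    = (2:Int) ^ (PySem.Int.mod j 10).toNat := by
  have h0 : (0:Int) ≤ PySem.Int.mod j 10 := PySem.Int.mod_nonneg j (by norm_num)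
  have h1 : PySem.Int.mod j 10 < 10 := PySem.Int.mod_lt j (by norm_num)
  rw [PySem.List.pyGetD_map_pyRange_of_nonneg _ _ _ _ h0 h1]

lemma bdWhile_eq_replicate (row : List Int) (k : Nat) :
    bdWhile row k = List.replicate k row := by
  induction k with
  | zero => rfl
  | succ k ih => simp [bdWhile, ih, List.replicate_succ]

-- the periodic row as a map over range equals tile-and-truncate
lemma row_tile (n : Nat) :
    (List.range n).map (fun k => (2:Int) ^ (k % 10)) =
      (List.replicate (n / 10) [(1:Int), 2, 4, 8, 16, 32, 64, 128, 256, 512]).flatten ++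
        [(1:Int), 2, 4, 8, 16, 32, 64, 128, 256, 512].take (n % 10) := by
  induction n with
  | zero => simp
  | succ n ih =>
    rw [List.range_succ, List.map_append, ih]
    rcases Nat.lt_or_ge (n % 10) 9 with h | h
    · have hd : (n + 1) / 10 = n / 10 := by omega
      have hm : (n + 1) % 10 = n % 10 + 1 := by omega
      rw [hd, hm]
      have hr : n % 10 < 10 := by omega
      interval_cases hcase : (n % 10) <;> simp_all
    · have h9 : n % 10 = 9 := by omega
      have hd : (n + 1) / 10 = n / 10 + 1 := by omega
      have hm : (n + 1) % 10 = 0 := by omega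
      rw [hd, hm, h9, List.replicate_succ']
      simp [h9]

lemma mod_toNat (k : Nat) : (PySem.Int.mod (k : Int) 10).toNat = k % 10 := by
  have h : ((k:Int)).fmod 10 = (k:Int) % 10 := by rw [Int.fmod_eq_emod]; norm_num
  simp [PySem.Int.mod, h]
  omega

-- ===== VERDICT (by name: the statement is the Claim_ definition above) =====
theorem buildDilation_spec : Claim_equal_buildDilation := by
  intro stack_size layer_size _
  unfold Spec_buildDilation buildDilation buildDilation_alt
  by_cases h : 0 < stack_size
  case neg =>
    rw [if_neg h, PySem.List.pyRange_one_eq_nil (by omega : stack_size ≤ 0)]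
    simp
  rw [if_pos h]
  simp only [PySem.List.foldl_append_singleton_eq_map, List.nil_append]
  rw [bdWhile_eq_replicate]
  have hrow : (PySem.List.pyRange 0 layer_size 1).map
      (fun j => PySem.List.pyGetD ((PySem.List.pyRange 0 10 1).map (fun i => (2:Int) ^ i.toNat)) (PySem.Int.mod j 10) 0)
      = (List.replicate ((PySem.Int.floordiv (max layer_size 0) 10).toNat)
           [(1:Int), 2, 4, 8, 16, 32, 64, 128, 256, 512]).flatten ++
        [(1:Int), 2, 4, 8, 16, 32, 64, 128, 256, 512].take ((PySem.Int.mod (max layer_size 0) 10).toNat) := by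
    have hfd : (PySem.Int.floordiv (max layer_size 0) 10).toNat = layer_size.toNat / 10 := by
      have h : (max layer_size 0).fdiv 10 = (max layer_size 0) / 10 := by rw [Int.fdiv_eq_ediv]; norm_num
      simp [PySem.Int.floordiv, h]
      omega
    have hmd : (PySem.Int.mod (max layer_size 0) 10).toNat = layer_size.toNat % 10 := by
      have h : (max layer_size 0).fmod 10 = (max layer_size 0) % 10 := by rw [Int.fmod_eq_emod]; norm_num
      simp [PySem.Int.mod, h]
      omega
    rw [hfd, hmd, ← row_tile]
    simp only [getD_coeff]
    rw [PySem.List.pyRange_one, List.map_map]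
    simp only [Int.sub_zero]
    apply List.map_congr_left
    intro k _
    simp only [Function.comp, zero_add, mod_toNat]
  rw [hrow]
  rw [PySem.List.pyRange_one, List.map_map]
  simp only [Function.comp_def]
  rw [List.map_const', List.length_range]
  norm_num
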